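-- pv_equiv track=rewrite | github.com/HuwCheston/deep-pianist-identification | deep_pianist_identification/explainability/cav_utils.py | combine_hands
-- ===== SOURCE A (Python) =====
-- from itertools import groupby, product
--
-- def combine_hands(lh: list[tuple], rh: list[tuple]):
--     def sorter(arr: list[tuple]):
--         return sorted(arr, key=lambda x: (x[0], x[2]))
--
--     newlh = []
--     for key, group in groupby(lh, lambda x: x[0]):
--         group = list(group)
--         # Sort by pitches
--         sort = sorted(group, key=lambda x: x[2])
--         # Add everything but the lowest pitch to the right hand
--         if len(sort) > 1:
--             rh.extend(sort[1:])
--         # Keep only the lowest pitch in the left hand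
--         newlh.append(sort[0])
--     # Sort both arrays
--     return sorter(newlh), sorter(rh)
-- ===== SOURCE B (Python) =====
-- def combine_hands(lh: list[tuple], rh: list[tuple]):
--     def sorter(arr: list[tuple]):
--         return sorted(arr, key=lambda x: (x[0], x[2]))
--
--     newlh = []
--     run = []  # current consecutive key-group, kept sorted by pitch (stable)
--     for x in lh:
--         if run and run[0][0] != x[0]:
--             # key changed: keep the lowest pitch, move the rest to the right hand
--             newlh.append(run[0])
--             rh.extend(run[1:])
--             run = []
--         # insert x into the run after all elements with pitch <= x's pitch
--         i = 0
--         while i < len(run) and run[i][2] <= x[2]: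
--             i += 1
--         run.insert(i, x)
--     if run:
--         newlh.append(run[0])
--         rh.extend(run[1:])
--     return sorter(newlh), sorter(rh)
-- ===== Notes on version B (the rewrite author's own statement) =====
-- stated objective: alternative
-- what changed: Replaced itertools.groupby plus a per-group sorted() call by a single explicit pass over lh that maintains the current run as an incrementally pitch-sorted list (online insertion), flushing its head to newlh and its tail to rh at each key change.
import Mathlib
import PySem

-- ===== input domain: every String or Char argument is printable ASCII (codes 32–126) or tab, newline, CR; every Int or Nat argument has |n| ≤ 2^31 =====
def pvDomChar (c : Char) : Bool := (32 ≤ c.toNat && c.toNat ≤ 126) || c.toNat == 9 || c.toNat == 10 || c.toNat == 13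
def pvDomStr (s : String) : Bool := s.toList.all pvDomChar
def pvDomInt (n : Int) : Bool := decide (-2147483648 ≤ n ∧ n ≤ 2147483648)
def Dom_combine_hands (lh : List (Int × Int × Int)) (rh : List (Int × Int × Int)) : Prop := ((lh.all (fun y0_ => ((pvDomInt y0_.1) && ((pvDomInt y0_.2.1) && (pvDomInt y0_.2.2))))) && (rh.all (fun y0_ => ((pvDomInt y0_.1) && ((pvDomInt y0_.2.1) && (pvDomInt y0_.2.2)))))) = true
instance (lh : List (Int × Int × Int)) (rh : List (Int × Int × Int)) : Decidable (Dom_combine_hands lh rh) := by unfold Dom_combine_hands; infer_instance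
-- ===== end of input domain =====

-- B replaces itertools.groupby + a per-group sort by one explicit pass that maintains the
-- current run as an incrementally pitch-sorted list (objective: alternative decomposition).
-- Both A and B mutate rh in place identically (extend with each run's pitch-sorted tail);
-- the theorems below are about the return value.


-- ===== PORT A =====
-- itertools.groupby(lh, lambda x: x[0]) ported by hand: consecutive runs of equal first
-- component, in order (the unused group keys are dropped since A's loop ignores `key`).
def pvGroupRuns (k : Int) (g : List (Int × Int × Int)) : List (Int × Int × Int) → List (List (Int × Int × Int))
  | [] => [g]
  | x :: xs => if x.1 = k then pvGroupRuns k (g ++ [x]) xs else g :: pvGroupRuns x.1 [x] xs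

def pvGroupby : List (Int × Int × Int) → List (List (Int × Int × Int))
  | [] => []
  | x :: xs => pvGroupRuns x.1 [x] xs

-- sorted(arr, key=lambda x: (x[0], x[2]))
def pvSorter (arr : List (Int × Int × Int)) : List (Int × Int × Int) :=
  PySem.List.sorted2 arr (fun x => x.1) (fun x => x.2.2)

-- the loop body; sort[0] never raises because every group is nonempty, so .headD is exact
def pvStepA (acc : List (Int × Int × Int) × List (Int × Int × Int)) (g : List (Int × Int × Int)) :
    List (Int × Int × Int) × List (Int × Int × Int) :=
  let sort := PySem.List.sorted g (fun x => x.2.2)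
  let rh' := if 1 < sort.length then acc.2 ++ PySem.List.slice sort (some 1) else acc.2
  (acc.1 ++ [sort.headD (0, 0, 0)], rh')

def combine_hands (lh : List (Int × Int × Int)) (rh : List (Int × Int × Int)) : (List (Int × Int × Int)) × (List (Int × Int × Int)) :=
  let res := (pvGroupby lh).foldl pvStepA ([], rh)
  (pvSorter res.1, pvSorter res.2)

-- ===== PORT B =====
-- the while/insert: place x after every run element whose pitch is <= x's pitch
def pvInsRun (x : Int × Int × Int) : List (Int × Int × Int) → List (Int × Int × Int)
  | [] => [x]
  | e :: es => if e.2.2 ≤ x.2.2 then e :: pvInsRun x es else x :: e :: es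

-- the for-loop over lh with state (run, newlh, rh), plus the final flush
def pvLoopB : List (Int × Int × Int) → List (Int × Int × Int) → List (Int × Int × Int) → List (Int × Int × Int) →
    List (Int × Int × Int) × List (Int × Int × Int)
  | [], run, nl, r =>
    match run with
    | [] => (nl, r)
    | m :: t => (nl ++ [m], r ++ t)
  | x :: xs, run, nl, r =>
    match run with
    | [] => pvLoopB xs (pvInsRun x []) nl r
    | m :: t =>
      if m.1 ≠ x.1 then pvLoopB xs (pvInsRun x []) (nl ++ [m]) (r ++ t)
      else pvLoopB xs (pvInsRun x (m :: t)) nl r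

def combine_hands_alt (lh : List (Int × Int × Int)) (rh : List (Int × Int × Int)) : (List (Int × Int × Int)) × (List (Int × Int × Int)) :=
  let res := pvLoopB lh [] [] rh
  (pvSorter res.1, pvSorter res.2)

-- ===== PRECONDITION & SPEC =====
def Spec_combine_hands (lh : List (Int × Int × Int)) (rh : List (Int × Int × Int)) (out : (List (Int × Int × Int)) × (List (Int × Int × Int))) : Prop := out = combine_hands_alt lh rh
instance (lh : List (Int × Int × Int)) (rh : List (Int × Int × Int)) (out : (List (Int × Int × Int)) × (List (Int × Int × Int))) : Decidable (Spec_combine_hands lh rh out) := by unfold Spec_combine_hands; infer_instance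

-- ===== CLAIM (what is proved, stated in full; the proofs are below) =====
def Claim_equal_combine_hands : Prop := ∀ (lh : List (Int × Int × Int)) (rh : List (Int × Int × Int)), Dom_combine_hands lh rh → Spec_combine_hands lh rh (combine_hands lh rh)

-- ===== LEMMAS AND PROOFS =====

-- B's hand-written insert is PySem's stable insertion step for the pitch key
theorem pvInsRun_eq (x : Int × Int × Int) (ys : List (Int × Int × Int)) :
    pvInsRun x ys = PySem.List.insertBy (fun a b => decide (a.2.2 < b.2.2)) x ys := by
  induction ys with
  | nil => simp [pvInsRun, PySem.List.insertBy]
  | cons e es ih =>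
    simp only [pvInsRun, PySem.List.insertBy, ih]
    by_cases h : e.2.2 ≤ x.2.2
    · simp [h, not_lt.mpr h]
    · simp [h, lt_of_not_ge h]

theorem sortP_append (g : List (Int × Int × Int)) (x : Int × Int × Int) :
    PySem.List.sorted (g ++ [x]) (fun y => y.2.2) =
      PySem.List.insertBy (fun a b => decide (a.2.2 < b.2.2)) x (PySem.List.sorted g (fun y => y.2.2)) := by
  rw [PySem.List.sorted_eq_foldl_insertBy, PySem.List.sorted_eq_foldl_insertBy, List.foldl_append]
  rfl

theorem sortP_ne_nil (g : List (Int × Int × Int)) (hg : g ≠ []) :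
    PySem.List.sorted g (fun y => y.2.2) ≠ [] := by
  intro h; exact hg ((PySem.List.sorted_eq_nil_iff g (fun y => y.2.2) false).mp h)

-- the step of A, given the sorted group explicitly
theorem pvStepA_eq (nl r g : List (Int × Int × Int)) (m : Int × Int × Int) (t : List (Int × Int × Int))
    (h : PySem.List.sorted g (fun y => y.2.2) = m :: t) :
    pvStepA (nl, r) g = (nl ++ [m], r ++ t) := by
  simp only [pvStepA, h]
  cases t with
  | nil => simp
  | cons b bs =>
    simp only [List.length_cons]
    rw [if_pos (by omega)]
    simp [PySem.List.slice_from (m :: b :: bs) (a := 1) (by omega)]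

theorem head_key (g : List (Int × Int × Int)) (k : Int) (hk : ∀ y ∈ g, y.1 = k)
    (m : Int × Int × Int) (t : List (Int × Int × Int))
    (h : PySem.List.sorted g (fun y => y.2.2) = m :: t) : m.1 = k := by
  have : m ∈ PySem.List.sorted g (fun y => y.2.2) := by rw [h]; exact List.mem_cons_self
  exact hk m ((PySem.List.mem_sorted g (fun y => y.2.2) false m).mp this)

-- main invariant: B's single pass with the sorted run equals A's fold over the remaining runs
theorem loop_eq (lh : List (Int × Int × Int)) : ∀ (k : Int) (g nl r : List (Int × Int × Int)),
    g ≠ [] → (∀ y ∈ g, y.1 = k) →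
    pvLoopB lh (PySem.List.sorted g (fun y => y.2.2)) nl r =
      (pvGroupRuns k g lh).foldl pvStepA (nl, r) := by
  induction lh with
  | nil =>
    intro k g nl r hg hk
    obtain ⟨m, t, h⟩ := List.exists_cons_of_ne_nil (sortP_ne_nil g hg)
    simp only [pvGroupRuns, List.foldl_cons, List.foldl_nil, pvStepA_eq nl r g m t h, h, pvLoopB]
  | cons x xs ih =>
    intro k g nl r hg hk
    obtain ⟨m, t, h⟩ := List.exists_cons_of_ne_nil (sortP_ne_nil g hg)
    have hm : m.1 = k := head_key g k hk m t h
    simp only [pvGroupRuns, h, pvLoopB]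
    by_cases hx : x.1 = k
    · rw [if_neg (by simp [hm, hx]), if_pos hx, ← h, pvInsRun_eq, ← sortP_append]
      exact ih k (g ++ [x]) nl r (by simp) (by intro y hy; rcases List.mem_append.mp hy with h' | h'
                                               · exact hk y h'
                                               · simp at h'; simp [h', hx])
    · rw [if_pos (by simp only [hm]; exact fun h' => hx h'.symm), if_neg hx]
      have h1 : pvInsRun x [] = PySem.List.sorted [x] (fun y => y.2.2) := by
        simp [pvInsRun, PySem.List.sorted_eq_foldl_insertBy, PySem.List.insertBy]
      rw [h1, List.foldl_cons, pvStepA_eq nl r g m t h]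
      exact ih x.1 [x] (nl ++ [m]) (r ++ t) (by simp) (by simp)

-- ===== VERDICT (by name: the statement is the Claim_ definition above) =====
theorem combine_hands_spec : Claim_equal_combine_hands := by
  intro lh rh _
  unfold Spec_combine_hands combine_hands combine_hands_alt
  cases lh with
  | nil => rfl
  | cons x xs =>
    have h1 : pvLoopB (x :: xs) [] [] rh =
        (pvGroupby (x :: xs)).foldl pvStepA ([], rh) := by
      have h0 : pvInsRun x [] = PySem.List.sorted [x] (fun y => y.2.2) := by
        simp [pvInsRun, PySem.List.sorted_eq_foldl_insertBy, PySem.List.insertBy]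
      simp only [pvLoopB, h0, pvGroupby]
      exact loop_eq xs x.1 [x] [] rh (by simp) (by simp)
    rw [h1]
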